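-- pv_equiv track=rewrite | github.com/malejandramunoz/P2_3011 | MunozMaria_086_P2.py | count_nucl_freq
-- ===== SOURCE A (Python) =====
-- def count_nucl_freq(dataList):
--     """Count the occurrences of characters by column."""
--     pos = 0  # it's a counter to make sure it's the correct position every time
--     resultList = list()  # creates an empty list to append the things
--     while len(resultList) != len(dataList[0]):  # it makes sure that this result list is not bigger than the length
--         # of the strings in dataList
--         insideString = ""  # this is inside the while, so that every time it finishes and goes to top, it's a "new" list
--         for value in dataList: # it does it for every value inside the dataList
--             insideString = insideString + value[int(pos)]  # the inside string is the columns
--         resultList.append(insideString)  # it appends the columns so that once it's lists is "renovated", i can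
--         # still reference it
--         pos += 1  # an update counter
--
--     alphabetlist = list()  # the list of letters in the resultingList, which is what would we use to find each count
--     for listings in resultList:  # it enters the list and shows every list of columns
--         for chars in listings:  # it enters every character of the columns
--             if chars not in alphabetlist:  # it checks if it's not in the character so it can be added.
--                 alphabetlist.append(chars)  # it appends the character, so that it can be turned into a dictionary later
--
--     def alphabet_dictionary(alphabetlist):  # this is a function that will be used more than once during this specific
--         # function
--         alphabetdictionary = dict() # it opens the dictionary that i want use
--         for letters in alphabetlist:  # it goes inside the list that i already have, so it can take each value
--             alphabetdictionary[letters] = alphabetdictionary.get(letters, 0)  # as i am not counting yet, i put the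
--             # value at 0
--         return alphabetdictionary
--
--     countStruct = list()  # finally this is the list that i will return in this function
--     for eachString in resultList:  # it goes inside each string in the result List, which are the columns
--         countDictionary = alphabet_dictionary(alphabetlist)  # it creates the dictionary every time so it's a "new" one
--         for eachCharacters in eachString:  # now it starts counting
--             countDictionary[eachCharacters] = countDictionary[eachCharacters] + 1
--         countStruct.append(countDictionary)  # it appends the dictionary into the list that will be returned
--     return countStruct
-- ===== SOURCE B (Python) =====
-- def count_nucl_freq(dataList):
--     """Row-major accumulation, then densify each column dict with the global alphabet."""
--     ncols = len(dataList[0])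
--     counts = [dict() for _ in range(ncols)]
--     for s in dataList:
--         for col, d in enumerate(counts):
--             c = s[col]
--             d[c] = d.get(c, 0) + 1
--     alphabet = {}
--     for d in counts:
--         for c in d:
--             alphabet[c] = 0
--     return [{c: d.get(c, 0) for c in alphabet} for d in counts]
-- ===== Notes on version B (the rewrite author's own statement) =====
-- stated objective: alternative
-- what changed: Replaces A's column-major transpose-then-recount (build each column string, then recount it into a freshly zero-initialised alphabet dict) with one row-major accumulation pass into per-column counters followed by a densifying pass that fills in the global alphabet with zeros.
import Mathlib
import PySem

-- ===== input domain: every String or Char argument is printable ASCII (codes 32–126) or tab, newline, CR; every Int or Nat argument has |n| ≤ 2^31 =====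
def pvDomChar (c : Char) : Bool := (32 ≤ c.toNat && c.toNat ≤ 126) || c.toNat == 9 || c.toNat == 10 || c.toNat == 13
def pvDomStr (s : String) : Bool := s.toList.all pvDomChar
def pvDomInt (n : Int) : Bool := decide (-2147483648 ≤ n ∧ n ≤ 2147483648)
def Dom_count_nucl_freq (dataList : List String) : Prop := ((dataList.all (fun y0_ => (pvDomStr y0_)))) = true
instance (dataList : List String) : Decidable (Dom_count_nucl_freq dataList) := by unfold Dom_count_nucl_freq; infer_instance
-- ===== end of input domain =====

-- B replaces A's column-major transpose-then-recount by a row-major accumulate-then-densify pass (alternative decomposition, same cost).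


-- ===== PORT A =====
-- the while loop building the column strings: runs len(dataList[0]) times, pos counts up
-- (value[pos] raising IndexError is excluded by Pre_; the total form uses a ' ' default there)
def pvA_cols (dataList : List String) : Nat → Nat → List (List Char)
  | 0, _ => []
  | n + 1, pos =>
      (dataList.foldl (fun acc v => acc ++ [(PySem.Str.pyGet? v (pos : Int)).getD ' ']) [])
        :: pvA_cols dataList n (pos + 1)

def count_nucl_freq (dataList : List String) : List (List (String × Int)) :=
  let resultList := pvA_cols dataList (dataList.headD "").toList.length 0
  let alphabetlist := resultList.foldl (fun al listing => listing.foldl PySem.Set.add al) []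
  resultList.map (fun eachString =>
    let countDictionary :=
      alphabetlist.foldl (fun d letters => d.insert letters (d.getD letters 0))
        (PySem.Dict.empty : PySem.Dict Char Int)
    let counted := eachString.foldl (fun d c => d.insert c (d.getD c 0 + 1)) countDictionary
    counted.items.map (fun p => (String.singleton p.1, p.2)))

-- ===== PORT B =====
-- one row of the accumulation pass: for col, d in enumerate(counts): d[s[col]] = d.get(s[col],0)+1
def pvB_bumpRow (s : String) (counts : List (PySem.Dict Char Int)) : List (PySem.Dict Char Int) :=
  (PySem.List.enumerate counts 0).map
    (fun p => p.2.modify ((PySem.Str.pyGet? s p.1).getD ' ') 0 (· + 1))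

def count_nucl_freq_alt (dataList : List String) : List (List (String × Int)) :=
  let ncols := (dataList.headD "").toList.length
  let counts := dataList.foldl (fun cs s => pvB_bumpRow s cs)
      (List.replicate ncols (PySem.Dict.empty : PySem.Dict Char Int))
  let alphabet := counts.foldl (fun a d => d.keys.foldl (fun a c => a.insert c (0 : Int)) a)
      (PySem.Dict.empty : PySem.Dict Char Int)
  -- dict comprehension over the distinct alphabet keys, as its items list
  counts.map (fun d => alphabet.keys.map (fun c => (String.singleton c, d.getD c 0)))

-- ===== PRECONDITION & SPEC =====
-- Pre_ excludes exactly the inputs on which Python A raises: the empty list (dataList[0] is an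
-- IndexError) and lists in which some string is shorter than dataList[0] (value[pos] IndexError).
def Pre_count_nucl_freq (dataList : List String) : Prop :=
  dataList ≠ [] ∧ ∀ s ∈ dataList, (dataList.headD "").toList.length ≤ s.toList.length
instance (dataList : List String) : Decidable (Pre_count_nucl_freq dataList) := by
  unfold Pre_count_nucl_freq; infer_instance
def pvWitness_count_nucl_freq : List String := ["AC", "GT", "AT"]

def Spec_count_nucl_freq (dataList : List String) (out : List (List (String × Int))) : Prop := out = count_nucl_freq_alt dataList
instance (dataList : List String) (out : List (List (String × Int))) : Decidable (Spec_count_nucl_freq dataList out) := by unfold Spec_count_nucl_freq; infer_instance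

-- ===== CLAIM (what is proved, stated in full; the proofs are below) =====
def Claim_equal_count_nucl_freq : Prop := ∀ (dataList : List String), Dom_count_nucl_freq dataList → Pre_count_nucl_freq dataList → Spec_count_nucl_freq dataList (count_nucl_freq dataList)

-- ===== LEMMAS AND PROOFS =====

-- the character of row v at column j (total form; IndexError excluded by Pre_)
def pvCh (j : Nat) (v : String) : Char := (PySem.Str.pyGet? v (j : Int)).getD ' '
-- column j of the data
def pvCol (dataList : List String) (j : Nat) : List Char := dataList.map (pvCh j)

-- ----- A side -----
theorem pvA_cols_eq (dataList : List String) :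
    ∀ (n p : Nat), pvA_cols dataList n p = (List.range' p n).map (pvCol dataList) := by
  intro n
  induction n with
  | zero => intro p; simp [pvA_cols]
  | succ n ih =>
      intro p
      simp only [pvA_cols, PySem.List.foldl_append_singleton_eq_map, List.nil_append,
        List.range', List.map_cons, ih]
      rfl

theorem pv_d0_getD (al : List Char) :
    ∀ (d : PySem.Dict Char Int), (∀ k, d.getD k 0 = 0) →
      ∀ k, (al.foldl (fun d l => d.insert l (d.getD l 0)) d).getD k 0 = 0 := by
  induction al with
  | nil => intro d h k; exact h k
  | cons a al ih =>
      intro d h k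
      simp only [List.foldl_cons]
      refine ih _ (fun k' => ?_) k
      rw [PySem.Dict.getD_insert]
      split <;> simp [h]

-- ----- Set.update toolkit -----
theorem pv_update_append {α : Type} [BEq α] (s : PySem.Set α) (a b : List α) :
    PySem.Set.update s (a ++ b) = PySem.Set.update (PySem.Set.update s a) b := by
  simp [PySem.Set.update, List.foldl_append]

theorem pv_mem_update {α : Type} [BEq α] [LawfulBEq α] (t : List α) :
    ∀ (s : PySem.Set α) (x : α), x ∈ PySem.Set.update s t ↔ x ∈ s ∨ x ∈ t := by
  induction t with
  | nil => intro s x; simp [PySem.Set.update]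
  | cons y t ih =>
      intro s x
      simp only [PySem.Set.update, List.foldl_cons] at *
      rw [ih (PySem.Set.add s y) x, PySem.Set.mem_add]
      simp [or_assoc, or_comm, or_left_comm]

theorem pv_add_of_mem {α : Type} [BEq α] [LawfulBEq α] (s : PySem.Set α) (x : α) (h : x ∈ s) :
    PySem.Set.add s x = s := by
  simp [PySem.Set.add, h]

theorem pv_update_add {α : Type} [BEq α] [LawfulBEq α] (s t : PySem.Set α) (x : α) :
    PySem.Set.update s (PySem.Set.add t x) = PySem.Set.add (PySem.Set.update s t) x := by
  by_cases hx : x ∈ t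
  · rw [pv_add_of_mem t x hx, pv_add_of_mem]
    exact (pv_mem_update t s x).mpr (Or.inr hx)
  · have : PySem.Set.add t x = t ++ [x] := by
      simp [PySem.Set.add, hx]
    rw [this, pv_update_append]
    rfl

theorem pv_update_foldl_add {α : Type} [BEq α] [LawfulBEq α] (l : List α) :
    ∀ (t s : PySem.Set α),
      PySem.Set.update s (List.foldl PySem.Set.add t l) = PySem.Set.update (PySem.Set.update s t) l := by
  induction l with
  | nil => intro t s; rfl
  | cons x l ih =>
      intro t s
      simp only [List.foldl_cons]
      rw [ih (PySem.Set.add t x) s, pv_update_add]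
      rfl

theorem pv_update_ofList {α : Type} [BEq α] [LawfulBEq α] (s : PySem.Set α) (l : List α) :
    PySem.Set.update s (PySem.Set.ofList l) = PySem.Set.update s l := by
  rw [PySem.Set.ofList_eq_foldl, pv_update_foldl_add]
  rfl

theorem pv_update_flatten_ofList {α : Type} [BEq α] [LawfulBEq α] (L : List (List α)) :
    ∀ (s : PySem.Set α),
      PySem.Set.update s (L.map PySem.Set.ofList).flatten = PySem.Set.update s L.flatten := by
  induction L with
  | nil => intro s; rfl
  | cons h L ih =>
      intro s
      simp only [List.map_cons, List.flatten_cons]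
      rw [pv_update_append, pv_update_append, pv_update_ofList, ih]

theorem pv_update_of_subset {α : Type} [BEq α] [LawfulBEq α] (l : List α) :
    ∀ (s : PySem.Set α), (∀ x ∈ l, x ∈ s) → PySem.Set.update s l = s := by
  induction l with
  | nil => intro s _; rfl
  | cons x l ih =>
      intro s h
      have hx : PySem.Set.add s x = s := pv_add_of_mem s x (h x (List.mem_cons_self ..))
      have : PySem.Set.update s (x :: l) = PySem.Set.update (PySem.Set.add s x) l := rfl
      rw [this, hx]
      exact ih s (fun y hy => h y (List.mem_cons_of_mem _ hy))

-- ----- B side -----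
theorem pv_enumerate_map_range' {α : Type} (f : Nat → α) :
    ∀ (n k : Nat), PySem.List.enumerate ((List.range' k n).map f) (k : Int)
      = (List.range' k n).map (fun (i : Nat) => ((i : Int), f i)) := by
  intro n
  induction n with
  | zero => intro k; simp
  | succ n ih =>
      intro k
      simp only [List.range', List.map_cons, PySem.List.enumerate]
      have : ((k : Int) + 1) = ((k + 1 : Nat) : Int) := by push_cast; ring
      rw [this, ih (k + 1)]

theorem pv_bumpRow_map_range (s : String) (n : Nat) (f : Nat → PySem.Dict Char Int) :
    pvB_bumpRow s ((List.range n).map f)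
      = (List.range n).map (fun j => (f j).modify (pvCh j s) 0 (· + 1)) := by
  unfold pvB_bumpRow
  rw [List.range_eq_range']
  have h0 : ((0 : Nat) : Int) = 0 := rfl
  rw [← h0, pv_enumerate_map_range' f n 0, List.map_map]
  simp [Function.comp, pvCh]

theorem pv_counts_inv (n : Nat) :
    ∀ (rows R : List String),
      rows.foldl (fun cs s => pvB_bumpRow s cs)
          ((List.range n).map (fun j => PySem.Dict.counter (R.map (pvCh j))))
        = (List.range n).map (fun j => PySem.Dict.counter ((R ++ rows).map (pvCh j))) := by
  intro rows
  induction rows with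
  | nil => intro R; simp
  | cons s rows ih =>
      intro R
      simp only [List.foldl_cons]
      rw [pv_bumpRow_map_range]
      have : (fun j => (PySem.Dict.counter (R.map (pvCh j))).modify (pvCh j s) 0 (· + 1))
           = (fun j => PySem.Dict.counter ((R ++ [s]).map (pvCh j))) := by
        funext j
        rw [← PySem.Dict.counter_append_singleton]
        simp
      rw [this, ih (R ++ [s])]
      simp

theorem pv_alpha_keys (counts : List (PySem.Dict Char Int)) :
    ∀ (a : PySem.Dict Char Int),
      (counts.foldl (fun a d => d.keys.foldl (fun a c => a.insert c (0 : Int)) a) a).keys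
        = PySem.Set.update a.keys (counts.map PySem.Dict.keys).flatten := by
  induction counts with
  | nil => intro a; rfl
  | cons d counts ih =>
      intro a
      simp only [List.foldl_cons, List.map_cons, List.flatten_cons]
      rw [ih, PySem.Dict.keys_foldl_insert d.keys (fun _ _ => (0 : Int)) a, pv_update_append]

-- the common canonical form: per column, the global alphabet with that column's counts
def pvCanon (dataList : List String) : List (List (String × Int)) :=
  let n := (dataList.headD "").toList.length
  let R := (List.range n).map (pvCol dataList)
  R.map (fun s => (PySem.Set.ofList R.flatten).map
    (fun k => (String.singleton k, ((List.count k s : Nat) : Int))))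

theorem pvA_canon (dataList : List String) : count_nucl_freq dataList = pvCanon dataList := by
  unfold count_nucl_freq pvCanon
  dsimp only
  rw [pvA_cols_eq, ← List.range_eq_range']
  set n := (dataList.headD "").toList.length with hn
  set R := (List.range n).map (pvCol dataList) with hR
  have hA : (R.foldl (fun al listing => listing.foldl PySem.Set.add al) [])
      = PySem.Set.ofList R.flatten := by
    rw [PySem.Set.ofList_eq_foldl, List.foldl_flatten]
  rw [hA]
  set al := PySem.Set.ofList R.flatten with hal
  have hnodup : al.Nodup := by rw [hal]; exact PySem.Set.nodup_ofList _
  apply List.map_congr_left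
  intro s hs
  have hkeys0 : (al.foldl (fun d letters => d.insert letters (d.getD letters 0))
      (PySem.Dict.empty : PySem.Dict Char Int)).keys = al := by
    rw [PySem.Dict.keys_foldl_insert al (fun d x => d.getD x 0), PySem.Dict.keys_empty,
      PySem.Set.update_nil_left, hal, PySem.Set.ofList_ofList]
  set d0 := al.foldl (fun d letters => d.insert letters (d.getD letters 0))
      (PySem.Dict.empty : PySem.Dict Char Int) with hd0
  have h0 : ∀ k, d0.getD k 0 = 0 :=
    pv_d0_getD al PySem.Dict.empty (fun k => PySem.Dict.getD_empty k 0)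
  have hsub : ∀ x ∈ s, x ∈ al := by
    intro x hx
    rw [hal, PySem.Set.mem_ofList]
    exact List.mem_flatten.mpr ⟨s, hs, hx⟩
  have hkeys : (s.foldl (fun d c => d.insert c (d.getD c 0 + 1)) d0).keys = al := by
    rw [PySem.Dict.keys_foldl_insert s (fun d x => d.getD x 0 + 1) d0, hkeys0,
      pv_update_of_subset s al hsub]
  have hitems := PySem.Dict.items_eq_map_keys
      (s.foldl (fun d c => d.insert c (d.getD c 0 + 1)) d0) (by rw [hkeys]; exact hnodup) 0
  rw [hitems, hkeys, List.map_map]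
  apply List.map_congr_left
  intro k _
  simp only [Function.comp]
  rw [PySem.Dict.getD_foldl_insert_add_one, h0 k, zero_add]

theorem pvB_canon (dataList : List String) : count_nucl_freq_alt dataList = pvCanon dataList := by
  unfold count_nucl_freq_alt pvCanon
  dsimp only
  set n := (dataList.headD "").toList.length with hn
  have hrep : (List.replicate n (PySem.Dict.empty : PySem.Dict Char Int))
      = (List.range n).map (fun j => PySem.Dict.counter ((([] : List String)).map (pvCh j))) := by
    simp [PySem.Dict.counter, List.map_const']
  rw [hrep, pv_counts_inv n dataList []]
  simp only [List.nil_append]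
  have hcounts : (List.range n).map (fun j => PySem.Dict.counter (dataList.map (pvCh j)))
      = (List.range n).map (fun j => PySem.Dict.counter (pvCol dataList j)) := rfl
  rw [hcounts]
  set R := (List.range n).map (pvCol dataList) with hR
  have hmk : ((List.range n).map (fun j => PySem.Dict.counter (pvCol dataList j))).map
      PySem.Dict.keys = R.map PySem.Set.ofList := by
    rw [hR, List.map_map, List.map_map]
    apply List.map_congr_left
    intro j _
    simp only [Function.comp]
    exact PySem.Dict.keys_counter _
  have halpha : (((List.range n).map (fun j => PySem.Dict.counter (pvCol dataList j))).foldl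
      (fun a d => d.keys.foldl (fun a c => a.insert c (0 : Int)) a)
      (PySem.Dict.empty : PySem.Dict Char Int)).keys = PySem.Set.ofList R.flatten := by
    rw [pv_alpha_keys, hmk, PySem.Dict.keys_empty, pv_update_flatten_ofList,
      PySem.Set.update_nil_left]
  rw [halpha, List.map_map, hR, List.map_map]
  apply List.map_congr_left
  intro j _
  simp only [Function.comp]
  apply List.map_congr_left
  intro k _
  rw [PySem.Dict.getD_counter]

-- ===== VERDICT (by name: the statement is the Claim_ definition above) =====
theorem count_nucl_freq_spec : Claim_equal_count_nucl_freq := by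
  intro dataList _ _
  unfold Spec_count_nucl_freq
  rw [pvA_canon, pvB_canon]
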